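-- pv_equiv track=rewrite | github.com/justice-7/Algorithm | 프로그래머스/4/72416. 매출 하락 최소화/매출 하락 최소화.py | solution
-- ===== SOURCE A (Python) =====
-- def solution(sales, links):
--     answer  = 0
--
--     n = len(sales)
--     choice = [0]*(n+1)
--     g = [[] for _ in range(n+1)]
--     for p,c in links:
--         g[p].append(c)
--
--     dp = [[0,0] for _ in range(n+1)]
--
--     def dfs(a):
--         dp[a][0] = 0
--         dp[a][1] = sales[a-1]
--
--         if not g[a]:
--             return
--         extra_cost = float('inf')
--         for child in g[a]:
--             dfs(child)
--             if dp[child][0] < dp[child][1]: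
--                 dp[a][0]+=dp[child][0]
--                 dp[a][1]+=dp[child][0]
--                 extra_cost = min(extra_cost, dp[child][1]-dp[child][0])
--             else:
--                 dp[a][0]+=dp[child][1]
--                 dp[a][1]+=dp[child][1]
--                 extra_cost = 0
--         dp[a][0] += extra_cost
--
--     dfs(1)
--     return min(dp[1][0],dp[1][1])
-- ===== SOURCE B (Python) =====
-- def solution(sales, links):
--     n = len(sales)
--     g = [[] for _ in range(n + 1)]
--     for p, c in links:
--         g[p].append(c)
--
--     # Chaotic (Jacobi) fixpoint iteration: no recursion, no DFS order.  Each
--     # round recomputes every node's (uncovered, covered) pair from the previous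
--     # table; a node at height h is correct after h+1 rounds, so n rounds (with
--     # an early exit once the table stops changing) suffice.
--     dp = [(0, 0)] * (n + 1)
--     for _ in range(n):
--         nd = [(0, 0)]
--         for a in range(1, n + 1):
--             if g[a]:
--                 base = sum(min(dp[c]) for c in g[a])
--                 pen = min(max(0, dp[c][1] - dp[c][0]) for c in g[a])
--                 nd.append((base + pen, base + sales[a - 1]))
--             else:
--                 nd.append((0, sales[a - 1]))
--         if nd == dp:
--             break
--         dp = nd
--     return min(dp[1])
-- ===== Notes on version B (the rewrite author's own statement) =====
-- stated objective: alternative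
-- what changed: A computes the two-state cost by a recursive DFS that mutates a shared dp array and tracks the uncovered penalty with a float('inf') sentinel; B has no recursion and no traversal order at all: it runs a Jacobi-style chaotic fixpoint iteration, rebuilding the whole table from the previous one each round (penalty written closed-form as min(max(0, hi-lo))) with an early exit once the table stops changing.
-- outside the precondition, e.g. on solution([5, 7], [[1, 0]]): A returns 5, B returns 0; on solution([5, 7], [[2, 9]]): A returns 0, B raises IndexError
import Mathlib
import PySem

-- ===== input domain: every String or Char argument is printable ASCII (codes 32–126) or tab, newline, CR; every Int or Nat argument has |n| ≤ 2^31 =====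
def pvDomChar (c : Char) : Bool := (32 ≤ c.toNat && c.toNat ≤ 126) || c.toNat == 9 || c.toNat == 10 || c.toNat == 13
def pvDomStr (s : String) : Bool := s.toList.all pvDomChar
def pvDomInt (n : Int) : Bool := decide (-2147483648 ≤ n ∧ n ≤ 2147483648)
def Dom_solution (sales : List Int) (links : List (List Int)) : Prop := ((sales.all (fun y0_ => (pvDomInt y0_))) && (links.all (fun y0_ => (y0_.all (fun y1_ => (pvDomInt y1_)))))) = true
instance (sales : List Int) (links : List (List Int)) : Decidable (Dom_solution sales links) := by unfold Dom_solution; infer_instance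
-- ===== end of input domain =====

-- B replaces A's recursive DFS (in-place dp mutation plus a float('inf') extra-cost sentinel) by
-- a Jacobi-style chaotic fixpoint iteration: each round rebuilds the whole (uncovered, covered)
-- table from the previous one, with the penalty written closed-form as min(max(0, hi-lo)) and an
-- early exit once the table stops changing (objective: alternative decomposition, no recursion
-- and no traversal order); return values proved equal on Pre_.

-- ===== PORT A =====
-- adjacency construction, shared verbatim by both Pythons ('for p,c in links: g[p].append(c)')
def pvAppendChild (g : List (List Int)) (l : List Int) : List (List Int) :=
  match l with
  | [p, c] =>
    match PySem.List.pyGet? g p with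
    | some row => PySem.List.pySetD g p (row ++ [c])
    | none => g            -- Python: IndexError (excluded by Pre_)
  | _ => g                 -- Python: unpacking ValueError (excluded by Pre_)

def pvBuildG (n : Nat) (links : List (List Int)) : List (List Int) :=
  links.foldl pvAppendChild (List.replicate (n + 1) [])

-- g[a]  (valid under Pre_; default [] where Python would raise)
def pvChildren (g : List (List Int)) (a : Int) : List Int := PySem.List.pyGetD g a []

-- sales[a-1]  (valid under Pre_)
def pvSale (sales : List Int) (a : Int) : Int := PySem.List.pyGetD sales (a - 1) 0

-- A's dfs: dp is threaded functionally; the extra_cost float('inf') sentinel is Option Int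
-- (none = inf; it can only survive the loop when g[a] is empty, which returned early).
-- The Nat fuel bounds Python's recursion depth; Pre_ guarantees fuel n+1 is never exhausted.
def pvDfsA (g : List (List Int)) (sales : List Int) : Nat → Int → List (Int × Int) → List (Int × Int)
  | 0, _, dp => dp
  | fuel + 1, a, dp =>
    let dp := PySem.List.pySetD dp a (0, pvSale sales a)
    if pvChildren g a = [] then dp
    else
      let st := (pvChildren g a).foldl (fun (st : List (Int × Int) × Option Int) child =>
        let dp := pvDfsA g sales fuel child st.1
        let dc := PySem.List.pyGetD dp child (0, 0)
        let da := PySem.List.pyGetD dp a (0, 0)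
        if dc.1 < dc.2 then
          (PySem.List.pySetD dp a (da.1 + dc.1, da.2 + dc.1),
           some (match st.2 with | none => dc.2 - dc.1 | some e => min e (dc.2 - dc.1)))
        else
          (PySem.List.pySetD dp a (da.1 + dc.2, da.2 + dc.2), some 0)) (dp, (none : Option Int))
      match st.2 with
      | some e =>
        let da := PySem.List.pyGetD st.1 a (0, 0)
        PySem.List.pySetD st.1 a (da.1 + e, da.2)
      | none => st.1

-- 'answer' and 'choice' are dead locals of A and are not carried
def solution (sales : List Int) (links : List (List Int)) : Int :=
  let n := sales.length
  let g := pvBuildG n links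
  let dp0 : List (Int × Int) := List.replicate (n + 1) (0, 0)
  let dp := pvDfsA g sales (n + 1) 1 dp0
  let d1 := PySem.List.pyGetD dp 1 (0, 0)
  min d1.1 d1.2

-- ===== PORT B =====
-- body of B's inner loop: node a's new (uncovered, covered) pair read off the PREVIOUS table dp
def pvBody (g : List (List Int)) (sales : List Int) (dp : List (Int × Int)) (a : Int) : Int × Int :=
  if pvChildren g a ≠ [] then
    let base := ((pvChildren g a).map (fun c =>
      min (PySem.List.pyGetD dp c (0, 0)).1 (PySem.List.pyGetD dp c (0, 0)).2)).sum
    let pen := (PySem.List.min? ((pvChildren g a).map (fun c =>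
      max 0 ((PySem.List.pyGetD dp c (0, 0)).2 - (PySem.List.pyGetD dp c (0, 0)).1))) (fun x => x)).getD 0
    (base + pen, base + pvSale sales a)
  else (0, pvSale sales a)

-- one round: nd = [(0,0)] then append every node's recomputed pair
def pvSweep (g : List (List Int)) (sales : List Int) (n : Nat) (dp : List (Int × Int)) : List (Int × Int) :=
  (PySem.List.pyRange 1 ((n : Int) + 1)).foldl (fun nd a => nd ++ [pvBody g sales dp a]) [(0, 0)]

-- 'for _ in range(n): … if nd == dp: break; dp = nd'
def pvIter (g : List (List Int)) (sales : List Int) (n : Nat) : Nat → List (Int × Int) → List (Int × Int)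
  | 0, dp => dp
  | k + 1, dp =>
    let nd := pvSweep g sales n dp
    if nd == dp then dp else pvIter g sales n k nd

def solution_alt (sales : List Int) (links : List (List Int)) : Int :=
  let n := sales.length
  let g := pvBuildG n links
  let dp := pvIter g sales n n (List.replicate (n + 1) ((0 : Int), (0 : Int)))
  let t := PySem.List.pyGetD dp 1 (0, 0)
  min t.1 t.2

-- ===== PRECONDITION & SPEC =====
-- x is a strict descendant of a within 'f' edge steps in the parent→child adjacency g
def pvDesc (g : List (List Int)) : Nat → Int → Int → Bool
  | 0, _, _ => false
  | f + 1, a, x => (pvChildren g a).any (fun c => c == x || pvDesc g f c x)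

def pvLinkOk (n : Nat) (l : List Int) : Bool :=
  match l with
  | [p, c] => decide (-((n : Int) + 1) ≤ p) && decide (p ≤ (n : Int)) &&
              decide (-((n : Int) + 1) ≤ c) && decide (c ≤ (n : Int))
  | _ => false

-- Pre_ excludes inputs where A raises (empty sales, malformed link rows, parent indices outside
-- Python's list range, a cycle reachable from node 1 = RecursionError) and, to keep the claim on
-- the problem's natural domain of trees over nodes 1..n, inputs where some node's child index
-- lies outside 1..n (on a node reachable from node 1, or past either end of B's table anywhere:
-- A still returns there, reading wrapped negative indices or never touching the unreachable
-- link, while B's sweep recomputes every node, so it touches every link).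
def Pre_solution (sales : List Int) (links : List (List Int)) : Prop :=
  sales ≠ [] ∧ links.all (pvLinkOk sales.length) = true ∧
  ∀ a ∈ List.range sales.length,
    ((a : Int) + 1 = 1 ∨ pvDesc (pvBuildG sales.length links) (sales.length + 1) 1 ((a : Int) + 1) = true) →
      ((∀ c ∈ pvChildren (pvBuildG sales.length links) ((a : Int) + 1), 1 ≤ c ∧ c ≤ (sales.length : Int)) ∧
       pvDesc (pvBuildG sales.length links) (sales.length + 1) ((a : Int) + 1) ((a : Int) + 1) = false)
instance (sales : List Int) (links : List (List Int)) : Decidable (Pre_solution sales links) := by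
  unfold Pre_solution; infer_instance

def pvWitness_solution : List Int × List (List Int) := ([14, 21, 15, 20], [[1, 2], [2, 3], [1, 4]])

def Spec_solution (sales : List Int) (links : List (List Int)) (out : Int) : Prop := out = solution_alt sales links
instance (sales : List Int) (links : List (List Int)) (out : Int) : Decidable (Spec_solution sales links out) := by unfold Spec_solution; infer_instance

-- ===== CLAIM (what is proved, stated in full; the proofs are below) =====
def Claim_equal_solution : Prop := ∀ (sales : List Int) (links : List (List Int)), Dom_solution sales links → Pre_solution sales links → Spec_solution sales links (solution sales links)

-- ===== LEMMAS AND PROOFS =====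

-- the common spec recursion both ports are reduced to:
-- pvCost f a = the (uncovered, covered) pair of a's subtree, by structural recursion on fuel
def pvCost (g : List (List Int)) (sales : List Int) : Nat → Int → Int × Int
  | 0, _ => (0, 0)
  | f + 1, a =>
    if pvChildren g a ≠ [] then
      let base := ((pvChildren g a).map (fun c =>
        min (pvCost g sales f c).1 (pvCost g sales f c).2)).sum
      let pen := (PySem.List.min? ((pvChildren g a).map (fun c =>
        max 0 ((pvCost g sales f c).2 - (pvCost g sales f c).1))) (fun x => x)).getD 0
      (base + pen, base + pvSale sales a)
    else (0, pvSale sales a)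

lemma pvLen_pySetD {α : Type} (xs : List α) (i : Int) (v : α) :
    (PySem.List.pySetD xs i v).length = xs.length := by
  simp only [PySem.List.pySetD, PySem.List.pySet?]
  rcases PySem.List.pyIdx? xs.length i with _ | j <;> simp

lemma pvGetD_setD_self {α : Type} (xs : List α) (a : Int) (v d : α)
    (h0 : 0 ≤ a) (h1 : a < xs.length) :
    PySem.List.pyGetD (PySem.List.pySetD xs a v) a d = v := by
  have ha : a = ((a.toNat : Nat) : Int) := by omega
  rw [ha, PySem.List.pyGetD_pySetD_natCast xs a.toNat a.toNat v d (by omega)]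
  simp

lemma pvGetD_setD_ne {α : Type} (xs : List α) (a x : Int) (v d : α)
    (h0 : 0 ≤ a) (h1 : a < xs.length) (hx : 0 ≤ x) (hne : x ≠ a) :
    PySem.List.pyGetD (PySem.List.pySetD xs a v) x d = PySem.List.pyGetD xs x d := by
  have ha : a = ((a.toNat : Nat) : Int) := by omega
  have hxx : x = ((x.toNat : Nat) : Int) := by omega
  rw [ha, hxx, PySem.List.pyGetD_pySetD_natCast xs a.toNat x.toNat v d (by omega)]
  rw [if_neg (by omega)]

lemma pvDesc_succ_iff (g : List (List Int)) (f : Nat) (a x : Int) :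
    pvDesc g (f + 1) a x = true ↔ ∃ c ∈ pvChildren g a, c = x ∨ pvDesc g f c x = true := by
  show ((pvChildren g a).any fun c => c == x || pvDesc g f c x) = true ↔ _
  simp [List.any_eq_true]

lemma pvDesc_child (g : List (List Int)) (a c : Int) (f : Nat) (hc : c ∈ pvChildren g a) :
    pvDesc g (f + 1) a c = true :=
  (pvDesc_succ_iff g f a c).mpr ⟨c, hc, Or.inl rfl⟩

lemma pvDesc_step (g : List (List Int)) (a c x : Int) (f : Nat)
    (hc : c ∈ pvChildren g a) (h : pvDesc g f c x = true) : pvDesc g (f + 1) a x = true :=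
  (pvDesc_succ_iff g f a x).mpr ⟨c, hc, Or.inr h⟩

lemma pvDesc_mono (g : List (List Int)) :
    ∀ {f f' : Nat}, f ≤ f' → ∀ {a x : Int}, pvDesc g f a x = true → pvDesc g f' a x = true := by
  intro f
  induction f with
  | zero => intro f' _ a x hd; simp [pvDesc] at hd
  | succ k ih =>
    intro f' hle a x hd
    obtain ⟨m, rfl⟩ : ∃ m, f' = m + 1 := ⟨f' - 1, by omega⟩
    obtain ⟨c, hc, hcase⟩ := (pvDesc_succ_iff g k a x).mp hd
    rcases hcase with rfl | h2
    · exact pvDesc_child g a c m hc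
    · exact pvDesc_step g a c x m hc (ih (by omega) h2)

lemma pvDesc_snoc (g : List (List Int)) :
    ∀ (f : Nat) (s a c : Int), pvDesc g f s a = true → c ∈ pvChildren g a →
      pvDesc g (f + 1) s c = true := by
  intro f
  induction f with
  | zero => intro s a c h _; simp [pvDesc] at h
  | succ k ih =>
    intro s a c h hc
    obtain ⟨c', hc', hcase⟩ := (pvDesc_succ_iff g k s a).mp h
    rcases hcase with rfl | h2
    · exact pvDesc_step g s c' c (k + 1) hc' (pvDesc_child g c' c k hc)
    · exact pvDesc_step g s c' c (k + 1) hc' (ih c' a c h2 hc)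

-- 'dfs called at a with this much fuel terminates before the fuel runs out'
def pvGood (g : List (List Int)) : Nat → Int → Prop
  | 0, _ => False
  | f + 1, a => ∀ c ∈ pvChildren g a, pvGood g f c

lemma pvGood_mono (g : List (List Int)) :
    ∀ {k : Nat} {a : Int}, pvGood g k a → ∀ {k' : Nat}, k ≤ k' → pvGood g k' a := by
  intro k
  induction k with
  | zero => intro a h; exact absurd h (by simp [pvGood])
  | succ f ih =>
    intro a h k' hle
    obtain ⟨m, rfl⟩ : ∃ m, k' = m + 1 := ⟨k' - 1, by omega⟩
    intro c hc
    exact ih (h c hc) (by omega)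

lemma pvLen_le (n : Nat) (S : List Int) (hnd : S.Nodup)
    (hv : ∀ s ∈ S, 1 ≤ s ∧ s ≤ (n : Int)) : S.length ≤ n := by
  have h1 : S.toFinset ⊆ Finset.Icc (1 : Int) n := by
    intro x hx
    simp only [List.mem_toFinset] at hx
    have := hv x hx
    simp only [Finset.mem_Icc]
    omega
  have h2 := Finset.card_le_card h1
  rw [List.toFinset_card_of_nodup hnd, Int.card_Icc] at h2
  omega

lemma pvGood_of_acyclic (n : Nat) (g : List (List Int))
    (HR : ∀ x : Int, 1 ≤ x → x ≤ (n : Int) → (x = 1 ∨ pvDesc g (n + 1) 1 x = true) →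
      ((∀ c ∈ pvChildren g x, 1 ≤ c ∧ c ≤ (n : Int)) ∧ pvDesc g (n + 1) x x = false)) :
    ∀ (fuel : Nat) (S : List Int) (a : Int), 1 ≤ a → a ≤ (n : Int) →
      (a = 1 ∨ pvDesc g S.length 1 a = true) → a ∉ S → S.Nodup →
      (∀ s ∈ S, 1 ≤ s ∧ s ≤ (n : Int)) → (∀ s ∈ S, pvDesc g S.length s a = true) →
      n ≤ fuel + S.length → pvGood g fuel a := by
  intro fuel
  induction fuel with
  | zero =>
    intro S a ha1 ha2 _ haS hnd hv _ hlen
    exfalso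
    have hnd' : (a :: S).Nodup := List.nodup_cons.mpr ⟨haS, hnd⟩
    have hv' : ∀ s ∈ a :: S, 1 ≤ s ∧ s ≤ (n : Int) := by
      intro s hs
      rcases List.mem_cons.mp hs with rfl | hs'
      · exact ⟨ha1, ha2⟩
      · exact hv s hs'
    have := pvLen_le n (a :: S) hnd' hv'
    simp only [List.length_cons] at this
    omega
  | succ k ih =>
    intro S a ha1 ha2 hreach haS hnd hv hdesc hlen
    have hSn : S.length ≤ n := pvLen_le n S hnd hv
    have hra : a = 1 ∨ pvDesc g (n + 1) 1 a = true := by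
      rcases hreach with h | h
      · exact Or.inl h
      · exact Or.inr (pvDesc_mono g (by omega) h)
    have hHRa := HR a ha1 ha2 hra
    simp only [pvGood]
    intro c hc
    have hcv := hHRa.1 c hc
    have hrc : c = 1 ∨ pvDesc g (S.length + 1) 1 c = true := by
      right
      rcases hreach with rfl | h
      · exact pvDesc_child g 1 c S.length hc
      · exact pvDesc_snoc g S.length 1 a c h hc
    have hrc' : c = 1 ∨ pvDesc g (n + 1) 1 c = true := by
      rcases hrc with h | h
      · exact Or.inl h
      · exact Or.inr (pvDesc_mono g (by omega) h)
    have hHRc := HR c hcv.1 hcv.2 hrc'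
    have hca : c ≠ a := by
      intro h; subst h
      have h1 := pvDesc_child g c c 0 hc
      have h2 := pvDesc_mono g (show 0 + 1 ≤ n + 1 by omega) h1
      rw [hHRa.2] at h2; cases h2
    have hcS : c ∉ S := by
      intro hcs
      have h1 : pvDesc g S.length c a = true := hdesc c hcs
      have h2 : pvDesc g (S.length + 1) c c = true := pvDesc_snoc g S.length c a c h1 hc
      have h3 := pvDesc_mono g (show S.length + 1 ≤ n + 1 by omega) h2
      rw [hHRc.2] at h3; cases h3
    refine ih (a :: S) c hcv.1 hcv.2 (by simpa using hrc) ?_ ?_ ?_ ?_ (by simp; omega)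
    · simp only [List.mem_cons, not_or]; exact ⟨hca, hcS⟩
    · exact List.nodup_cons.mpr ⟨haS, hnd⟩
    · intro s hs
      rcases List.mem_cons.mp hs with rfl | hs'
      · exact ⟨ha1, ha2⟩
      · exact hv s hs'
    · intro s hs
      rcases List.mem_cons.mp hs with rfl | hs'
      · simpa using pvDesc_child g s c S.length hc
      · simpa using pvDesc_snoc g S.length s a c (hdesc s hs') hc

-- pvCost is stable once the fuel suffices
lemma pvCost_stable (g : List (List Int)) (sales : List Int) :
    ∀ {k : Nat} {a : Int}, pvGood g k a → ∀ {k' : Nat}, k ≤ k' →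
      pvCost g sales k a = pvCost g sales k' a := by
  intro k
  induction k with
  | zero => intro a h; exact absurd h (by simp [pvGood])
  | succ f ih =>
    intro a h k' hle
    obtain ⟨m, rfl⟩ : ∃ m, k' = m + 1 := ⟨k' - 1, by omega⟩
    simp only [pvCost]
    by_cases hk : pvChildren g a = []
    · rw [if_neg (by simpa using hk), if_neg (by simpa using hk)]
    · rw [if_pos hk, if_pos hk]
      have hmap1 : (pvChildren g a).map (fun c => min (pvCost g sales f c).1 (pvCost g sales f c).2)
          = (pvChildren g a).map (fun c => min (pvCost g sales m c).1 (pvCost g sales m c).2) := by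
        refine List.map_congr_left (fun c hc => ?_)
        rw [ih (h c hc) (show f ≤ m by omega)]
      have hmap2 : (pvChildren g a).map (fun c => max 0 ((pvCost g sales f c).2 - (pvCost g sales f c).1))
          = (pvChildren g a).map (fun c => max 0 ((pvCost g sales m c).2 - (pvCost g sales m c).1)) := by
        refine List.map_congr_left (fun c hc => ?_)
        rw [ih (h c hc) (show f ≤ m by omega)]
      rw [hmap1, hmap2]

-- ===== A-side: the extra_cost accumulator =====
def pvExtra (ks : List (Int × Int)) (e : Option Int) : Option Int :=
  ks.foldl (fun e uv =>
    if uv.1 < uv.2 then some (match e with | none => uv.2 - uv.1 | some e0 => min e0 (uv.2 - uv.1))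
    else some 0) e

lemma pvExtra_cons (uv : Int × Int) (l : List (Int × Int)) (e : Option Int) :
    pvExtra (uv :: l) e =
      pvExtra l (if uv.1 < uv.2 then some (match e with | none => uv.2 - uv.1 | some e0 => min e0 (uv.2 - uv.1)) else some 0) := rfl

lemma pvExtra_acc : ∀ (t : List (Int × Int)) (e0 : Int), 0 ≤ e0 →
    pvExtra t (some e0) = some (t.foldl (fun m uv => min m (max 0 (uv.2 - uv.1))) e0) := by
  intro t
  induction t with
  | nil => intro e0 _; rfl
  | cons uv l ih =>
    intro e0 he0
    rw [pvExtra_cons]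
    by_cases hlt : uv.1 < uv.2
    · rw [if_pos hlt]
      have h1 : max 0 (uv.2 - uv.1) = uv.2 - uv.1 := by omega
      rw [ih (min e0 (uv.2 - uv.1)) (by omega)]
      simp only [List.foldl_cons, h1]
    · rw [if_neg hlt]
      have h1 : min e0 (max 0 (uv.2 - uv.1)) = 0 := by omega
      rw [ih 0 (by omega)]
      simp only [List.foldl_cons, h1]

-- the loop's extra_cost over a nonempty child list IS B's min(max(0, hi-lo))
lemma pvExtra_spec (k : Int × Int) (t : List (Int × Int)) :
    pvExtra (k :: t) none =
      some ((PySem.List.min? ((k :: t).map (fun uv => max 0 (uv.2 - uv.1))) (fun x => x)).getD 0) := by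
  rw [List.map_cons, PySem.List.min?_id_cons, Option.getD_some, List.foldl_map]
  rw [pvExtra_cons]
  by_cases hlt : k.1 < k.2
  · rw [if_pos hlt]
    have h1 : max 0 (k.2 - k.1) = k.2 - k.1 := by omega
    rw [pvExtra_acc t (k.2 - k.1) (by omega), h1]
  · rw [if_neg hlt]
    have h1 : max 0 (k.2 - k.1) = 0 := by omega
    rw [pvExtra_acc t 0 (by omega), h1]

-- ===== the main dfs loop correspondence (A-side) =====

lemma pvLoop (n : Nat) (g : List (List Int)) (sales : List Int) (f d : Nat) (a : Int)
    (ha0 : 1 ≤ a) (ha1 : a ≤ (n : Int))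
    (Hdfs : ∀ c : Int, 1 ≤ c → c ≤ (n : Int) → (c = 1 ∨ pvDesc g (d + 1) 1 c = true) →
      pvGood g f c → ∀ dp : List (Int × Int), dp.length = n + 1 →
      (pvDfsA g sales f c dp).length = n + 1 ∧
      PySem.List.pyGetD (pvDfsA g sales f c dp) c (0, 0) = pvCost g sales f c ∧
      (∀ x : Int, 0 ≤ x → x ≠ c → pvDesc g f c x = false →
        PySem.List.pyGetD (pvDfsA g sales f c dp) x (0, 0) = PySem.List.pyGetD dp x (0, 0))) :
    ∀ (ks : List Int),
      (∀ c ∈ ks, (1 ≤ c ∧ c ≤ (n : Int)) ∧ (c = 1 ∨ pvDesc g (d + 1) 1 c = true) ∧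
        pvGood g f c ∧ c ≠ a ∧ pvDesc g f c a = false) →
      ∀ (dp : List (Int × Int)) (e : Option Int), dp.length = n + 1 →
      ((ks.foldl (fun (st : List (Int × Int) × Option Int) child =>
          let dp := pvDfsA g sales f child st.1
          let dc := PySem.List.pyGetD dp child (0, 0)
          let da := PySem.List.pyGetD dp a (0, 0)
          if dc.1 < dc.2 then
            (PySem.List.pySetD dp a (da.1 + dc.1, da.2 + dc.1),
             some (match st.2 with | none => dc.2 - dc.1 | some e => min e (dc.2 - dc.1)))
          else
            (PySem.List.pySetD dp a (da.1 + dc.2, da.2 + dc.2), some 0)) (dp, e)).1.length = n + 1 ∧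
       PySem.List.pyGetD (ks.foldl (fun (st : List (Int × Int) × Option Int) child =>
          let dp := pvDfsA g sales f child st.1
          let dc := PySem.List.pyGetD dp child (0, 0)
          let da := PySem.List.pyGetD dp a (0, 0)
          if dc.1 < dc.2 then
            (PySem.List.pySetD dp a (da.1 + dc.1, da.2 + dc.1),
             some (match st.2 with | none => dc.2 - dc.1 | some e => min e (dc.2 - dc.1)))
          else
            (PySem.List.pySetD dp a (da.1 + dc.2, da.2 + dc.2), some 0)) (dp, e)).1 a (0, 0) =
         ((PySem.List.pyGetD dp a (0, 0)).1 + (ks.map (fun c => min (pvCost g sales f c).1 (pvCost g sales f c).2)).sum,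
          (PySem.List.pyGetD dp a (0, 0)).2 + (ks.map (fun c => min (pvCost g sales f c).1 (pvCost g sales f c).2)).sum) ∧
       (ks.foldl (fun (st : List (Int × Int) × Option Int) child =>
          let dp := pvDfsA g sales f child st.1
          let dc := PySem.List.pyGetD dp child (0, 0)
          let da := PySem.List.pyGetD dp a (0, 0)
          if dc.1 < dc.2 then
            (PySem.List.pySetD dp a (da.1 + dc.1, da.2 + dc.1),
             some (match st.2 with | none => dc.2 - dc.1 | some e => min e (dc.2 - dc.1)))
          else
            (PySem.List.pySetD dp a (da.1 + dc.2, da.2 + dc.2), some 0)) (dp, e)).2 =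
         pvExtra (ks.map (pvCost g sales f)) e ∧
       (∀ x : Int, 0 ≤ x → x ≠ a → (∀ c ∈ ks, x ≠ c ∧ pvDesc g f c x = false) →
         PySem.List.pyGetD (ks.foldl (fun (st : List (Int × Int) × Option Int) child =>
          let dp := pvDfsA g sales f child st.1
          let dc := PySem.List.pyGetD dp child (0, 0)
          let da := PySem.List.pyGetD dp a (0, 0)
          if dc.1 < dc.2 then
            (PySem.List.pySetD dp a (da.1 + dc.1, da.2 + dc.1),
             some (match st.2 with | none => dc.2 - dc.1 | some e => min e (dc.2 - dc.1)))
          else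
            (PySem.List.pySetD dp a (da.1 + dc.2, da.2 + dc.2), some 0)) (dp, e)).1 x (0, 0) =
           PySem.List.pyGetD dp x (0, 0))) := by
  intro ks
  induction ks with
  | nil =>
    intro _ dp e hlen
    refine ⟨hlen, by simp, rfl, fun x _ _ _ => rfl⟩
  | cons c t ih =>
    intro hks dp e hlen
    obtain ⟨⟨hc1, hc2⟩, hcr, hcg, hca, hcd⟩ := hks c (List.mem_cons_self)
    have hks' := fun c' h => hks c' (List.mem_cons_of_mem _ h)
    obtain ⟨hL, hV, hP⟩ := Hdfs c hc1 hc2 hcr hcg dp hlen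
    have hda : PySem.List.pyGetD (pvDfsA g sales f c dp) a (0, 0) = PySem.List.pyGetD dp a (0, 0) :=
      hP a (by omega) (Ne.symm hca) hcd
    simp only [List.foldl_cons, hV, hda]
    by_cases hlt : (pvCost g sales f c).1 < (pvCost g sales f c).2
    · rw [if_pos hlt]
      have hlen' : (PySem.List.pySetD (pvDfsA g sales f c dp) a
          ((PySem.List.pyGetD dp a (0, 0)).1 + (pvCost g sales f c).1,
           (PySem.List.pyGetD dp a (0, 0)).2 + (pvCost g sales f c).1)).length = n + 1 := by
        rw [pvLen_pySetD]; exact hL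
      obtain ⟨iL, iV, iE, iP⟩ := ih hks' _
        (some (match e with
               | none => (pvCost g sales f c).2 - (pvCost g sales f c).1
               | some e0 => min e0 ((pvCost g sales f c).2 - (pvCost g sales f c).1))) hlen'
      refine ⟨iL, ?_, ?_, ?_⟩
      · rw [iV, pvGetD_setD_self _ a _ _ (by omega) (by rw [hL]; push_cast; omega)]
        rw [List.map_cons, List.sum_cons, min_eq_left hlt.le]
        refine Prod.ext ?_ ?_ <;> simp <;> ring
      · rw [iE, List.map_cons, pvExtra_cons, if_pos hlt]
      · intro x hx0 hxa hxk
        have hxc := hxk c (by simp)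
        rw [iP x hx0 hxa (fun c' h => hxk c' (by simp [h]))]
        rw [pvGetD_setD_ne _ a x _ _ (by omega) (by rw [hL]; push_cast; omega) hx0 hxa]
        exact hP x hx0 hxc.1 hxc.2
    · rw [if_neg hlt]
      have hlen' : (PySem.List.pySetD (pvDfsA g sales f c dp) a
          ((PySem.List.pyGetD dp a (0, 0)).1 + (pvCost g sales f c).2,
           (PySem.List.pyGetD dp a (0, 0)).2 + (pvCost g sales f c).2)).length = n + 1 := by
        rw [pvLen_pySetD]; exact hL
      obtain ⟨iL, iV, iE, iP⟩ := ih hks' _ (some 0) hlen'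
      refine ⟨iL, ?_, ?_, ?_⟩
      · rw [iV, pvGetD_setD_self _ a _ _ (by omega) (by rw [hL]; push_cast; omega)]
        rw [List.map_cons, List.sum_cons, min_eq_right (by omega : (pvCost g sales f c).2 ≤ (pvCost g sales f c).1)]
        refine Prod.ext ?_ ?_ <;> simp <;> ring
      · rw [iE, List.map_cons, pvExtra_cons, if_neg hlt]
      · intro x hx0 hxa hxk
        have hxc := hxk c (by simp)
        rw [iP x hx0 hxa (fun c' h => hxk c' (by simp [h]))]
        rw [pvGetD_setD_ne _ a x _ _ (by omega) (by rw [hL]; push_cast; omega) hx0 hxa]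
        exact hP x hx0 hxc.1 hxc.2

lemma pvDfs_eq (n : Nat) (g : List (List Int)) (sales : List Int)
    (HR : ∀ x : Int, 1 ≤ x → x ≤ (n : Int) → (x = 1 ∨ pvDesc g (n + 1) 1 x = true) →
      ((∀ c ∈ pvChildren g x, 1 ≤ c ∧ c ≤ (n : Int)) ∧ pvDesc g (n + 1) x x = false)) :
    ∀ fuel, fuel ≤ n + 1 → ∀ a : Int, 1 ≤ a → a ≤ (n : Int) → ∀ d : Nat, d + fuel ≤ n + 1 →
      (a = 1 ∨ pvDesc g d 1 a = true) → pvGood g fuel a →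
      ∀ dp : List (Int × Int), dp.length = n + 1 →
      (pvDfsA g sales fuel a dp).length = n + 1 ∧
      PySem.List.pyGetD (pvDfsA g sales fuel a dp) a (0, 0) = pvCost g sales fuel a ∧
      (∀ x : Int, 0 ≤ x → x ≠ a → pvDesc g fuel a x = false →
        PySem.List.pyGetD (pvDfsA g sales fuel a dp) x (0, 0) = PySem.List.pyGetD dp x (0, 0)) := by
  intro fuel
  induction fuel with
  | zero => intro _ a _ _ _ _ _ hgood; exact absurd hgood (by simp [pvGood])
  | succ f ihf =>
    intro hfle a ha1 ha2 d hd hreach hgood dp hlen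
    have hra : a = 1 ∨ pvDesc g (n + 1) 1 a = true := by
      rcases hreach with h | h
      · exact Or.inl h
      · exact Or.inr (pvDesc_mono g (by omega) h)
    have hHRa := HR a ha1 ha2 hra
    have hgood' : ∀ c ∈ pvChildren g a, pvGood g f c := hgood
    have hlen1 : (PySem.List.pySetD dp a (0, pvSale sales a)).length = n + 1 := by
      rw [pvLen_pySetD]; exact hlen
    have harange : a < (dp.length : Int) := by rw [hlen]; push_cast; omega
    by_cases hkids : pvChildren g a = []
    · refine ⟨?_, ?_, ?_⟩
      · simp only [pvDfsA]; rw [if_pos hkids]; exact hlen1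
      · simp only [pvDfsA, pvCost]
        rw [if_pos hkids, if_neg (by simpa using hkids)]
        exact pvGetD_setD_self _ a _ _ (by omega) harange
      · intro x hx0 hxa _
        simp only [pvDfsA]; rw [if_pos hkids]
        exact pvGetD_setD_ne _ a x _ _ (by omega) harange hx0 hxa
    · have hch : ∀ c ∈ pvChildren g a,
          (1 ≤ c ∧ c ≤ (n : Int)) ∧ (c = 1 ∨ pvDesc g (d + 1) 1 c = true) ∧
            pvGood g f c ∧ c ≠ a ∧ pvDesc g f c a = false := by
        intro c hc
        refine ⟨hHRa.1 c hc, ?_, hgood' c hc, ?_, ?_⟩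
        · right
          rcases hreach with rfl | h
          · exact pvDesc_child g 1 c d hc
          · exact pvDesc_snoc g d 1 a c h hc
        · intro h; subst h
          have h1 := pvDesc_child g c c 0 hc
          have h2 := pvDesc_mono g (show 0 + 1 ≤ n + 1 by omega) h1
          rw [hHRa.2] at h2; cases h2
        · by_contra h
          rw [Bool.not_eq_false] at h
          have h1 := pvDesc_step g a c a f hc h
          have h2 := pvDesc_mono g hfle h1
          rw [hHRa.2] at h2; cases h2
      obtain ⟨lL, lV, lE, lP⟩ := pvLoop n g sales f d a ha1 ha2
        (fun c h1 h2 h3 h4 dp' hl => ihf (by omega) c h1 h2 (d + 1) (by omega) h3 h4 dp' hl)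
        (pvChildren g a) hch (PySem.List.pySetD dp a (0, pvSale sales a)) none hlen1
      obtain ⟨k0, t0, hmap⟩ : ∃ k0 t0, (pvChildren g a).map (pvCost g sales f) = k0 :: t0 := by
        cases hml : (pvChildren g a).map (pvCost g sales f) with
        | nil => exact absurd (List.map_eq_nil_iff.mp hml) hkids
        | cons x y => exact ⟨x, y, rfl⟩
      have hv1 : PySem.List.pyGetD (PySem.List.pySetD dp a (0, pvSale sales a)) a (0, 0) =
          (0, pvSale sales a) := pvGetD_setD_self _ a _ _ (by omega) harange
      rw [hv1] at lV
      have hE := lE.trans (by rw [hmap, pvExtra_spec])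
      simp only [pvDfsA]
      rw [if_neg hkids]
      simp only [hE]
      refine ⟨by rw [pvLen_pySetD]; exact lL, ?_, ?_⟩
      · rw [pvGetD_setD_self _ a _ _ (by omega) (by rw [lL]; push_cast; omega), lV]
        simp only [pvCost]
        rw [if_pos hkids]
        have hpen : ((k0 :: t0).map (fun uv => max 0 (uv.2 - uv.1)))
            = (pvChildren g a).map (fun c => max 0 ((pvCost g sales f c).2 - (pvCost g sales f c).1)) := by
          rw [← hmap, List.map_map]; rfl
        rw [hpen]
        refine Prod.ext ?_ ?_
        · simp
        · simp [Int.add_comm]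
      · intro x hx0 hxa hdx
        have hxk : ∀ c ∈ pvChildren g a, x ≠ c ∧ pvDesc g f c x = false := by
          intro c hc
          constructor
          · intro h; subst h
            have h1 := pvDesc_child g a x f hc
            rw [hdx] at h1; cases h1
          · by_contra h
            rw [Bool.not_eq_false] at h
            have h1 := pvDesc_step g a c x f hc h
            rw [hdx] at h1; cases h1
        rw [pvGetD_setD_ne _ a x _ _ (by omega) (by rw [lL]; push_cast; omega) hx0 hxa]
        rw [lP x hx0 hxa hxk]
        exact pvGetD_setD_ne _ a x _ _ (by omega) harange hx0 hxa

-- ===== B-side: the sweep and its fixpoint iteration =====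

lemma pvSweep_eq (g : List (List Int)) (sales : List Int) (n : Nat) (dp : List (Int × Int)) :
    pvSweep g sales n dp =
      ((0 : Int), (0 : Int)) :: (List.range n).map (fun (k : Nat) => pvBody g sales dp ((k : Int) + 1)) := by
  unfold pvSweep
  rw [PySem.List.foldl_append_singleton_eq_map, PySem.List.pyRange_one]
  have hn : ((n : Int) + 1 - 1).toNat = n := by omega
  rw [hn, List.map_map, List.singleton_append]
  refine congrArg _ (List.map_congr_left fun k _ => ?_)
  show pvBody g sales dp (1 + (k : Int)) = pvBody g sales dp ((k : Int) + 1)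
  rw [Int.add_comm]

lemma pvSweep_get (g : List (List Int)) (sales : List Int) (n : Nat) (dp : List (Int × Int))
    (a : Int) (h1 : 1 ≤ a) (h2 : a ≤ (n : Int)) :
    PySem.List.pyGetD (pvSweep g sales n dp) a (0, 0) = pvBody g sales dp a := by
  rw [pvSweep_eq]
  have ha : a = ((a.toNat : Nat) : Int) := by omega
  rw [ha, PySem.List.pyGetD_natCast]
  obtain ⟨m, hm⟩ : ∃ m, a.toNat = m + 1 := ⟨a.toNat - 1, by omega⟩
  rw [hm, List.getD_cons_succ]
  have hmlt : m < n := by omega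
  rw [List.getD_eq_getElem _ _ (by simpa using hmlt)]
  simp only [List.getElem_map, List.getElem_range]
  congr 1

-- pure iterate of the sweep (what the loop computes, ignoring the early exit)
def pvPow (g : List (List Int)) (sales : List Int) (n : Nat) : Nat → List (Int × Int) → List (Int × Int)
  | 0, dp => dp
  | k + 1, dp => pvPow g sales n k (pvSweep g sales n dp)

lemma pvPow_fix (g : List (List Int)) (sales : List Int) (n : Nat) (dp : List (Int × Int))
    (h : pvSweep g sales n dp = dp) : ∀ k, pvPow g sales n k dp = dp := by
  intro k
  induction k with
  | zero => rfl
  | succ m ih => simp only [pvPow, h, ih]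

lemma pvIter_eq_pow (g : List (List Int)) (sales : List Int) (n : Nat) :
    ∀ (k : Nat) (dp : List (Int × Int)), pvIter g sales n k dp = pvPow g sales n k dp := by
  intro k
  induction k with
  | zero => intro dp; rfl
  | succ m ih =>
    intro dp
    simp only [pvIter, pvPow]
    by_cases h : pvSweep g sales n dp = dp
    · rw [if_pos (by simpa using h), h, pvPow_fix g sales n dp h m]
    · rw [if_neg (by simpa using h), ih]

lemma pvPow_succ' (g : List (List Int)) (sales : List Int) (n : Nat) :
    ∀ (k : Nat) (dp : List (Int × Int)),
      pvPow g sales n (k + 1) dp = pvSweep g sales n (pvPow g sales n k dp) := by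
  intro k
  induction k with
  | zero => intro dp; rfl
  | succ m ih =>
    intro dp
    show pvPow g sales n (m + 1) (pvSweep g sales n dp) = _
    rw [ih]
    rfl

-- after k rounds every node of 1's cone whose recursion needs at most fuel k carries pvCost k
lemma pvPow_get (g : List (List Int)) (sales : List Int) (n : Nat) (dp0 : List (Int × Int))
    (HR : ∀ x : Int, 1 ≤ x → x ≤ (n : Int) → (x = 1 ∨ pvDesc g (n + 1) 1 x = true) →
      ((∀ c ∈ pvChildren g x, 1 ≤ c ∧ c ≤ (n : Int)) ∧ pvDesc g (n + 1) x x = false)) :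
    ∀ (k : Nat) (a : Int), 1 ≤ a → a ≤ (n : Int) → ∀ d : Nat, d + k ≤ n + 1 →
      (a = 1 ∨ pvDesc g d 1 a = true) → pvGood g k a →
      PySem.List.pyGetD (pvPow g sales n k dp0) a (0, 0) = pvCost g sales k a := by
  intro k
  induction k with
  | zero => intro a _ _ _ _ _ h; exact absurd h (by simp [pvGood])
  | succ f ih =>
    intro a h1 h2 d hd hreach hgood
    have hra : a = 1 ∨ pvDesc g (n + 1) 1 a = true := by
      rcases hreach with h | h
      · exact Or.inl h
      · exact Or.inr (pvDesc_mono g (by omega) h)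
    have hHRa := HR a h1 h2 hra
    rw [pvPow_succ', pvSweep_get _ _ _ _ a h1 h2]
    have hgood' : ∀ c ∈ pvChildren g a, pvGood g f c := hgood
    have hrc : ∀ c ∈ pvChildren g a, c = 1 ∨ pvDesc g (d + 1) 1 c = true := by
      intro c hc
      right
      rcases hreach with rfl | h
      · exact pvDesc_child g 1 c d hc
      · exact pvDesc_snoc g d 1 a c h hc
    simp only [pvBody, pvCost]
    by_cases hk : pvChildren g a = []
    · rw [if_neg (by simpa using hk), if_neg (by simpa using hk)]
    · rw [if_pos hk, if_pos hk]
      have hmap1 : (pvChildren g a).map (fun c =>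
          min (PySem.List.pyGetD (pvPow g sales n f dp0) c (0, 0)).1
              (PySem.List.pyGetD (pvPow g sales n f dp0) c (0, 0)).2)
          = (pvChildren g a).map (fun c => min (pvCost g sales f c).1 (pvCost g sales f c).2) := by
        refine List.map_congr_left (fun c hc => ?_)
        rw [ih c (hHRa.1 c hc).1 (hHRa.1 c hc).2 (d + 1) (by omega) (hrc c hc) (hgood' c hc)]
      have hmap2 : (pvChildren g a).map (fun c =>
          max 0 ((PySem.List.pyGetD (pvPow g sales n f dp0) c (0, 0)).2
               - (PySem.List.pyGetD (pvPow g sales n f dp0) c (0, 0)).1))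
          = (pvChildren g a).map (fun c => max 0 ((pvCost g sales f c).2 - (pvCost g sales f c).1)) := by
        refine List.map_congr_left (fun c hc => ?_)
        rw [ih c (hHRa.1 c hc).1 (hHRa.1 c hc).2 (d + 1) (by omega) (hrc c hc) (hgood' c hc)]
      rw [hmap1, hmap2]

-- ===== VERDICT (by name: the statement is the Claim_ definition above) =====
theorem solution_spec : Claim_equal_solution := by
  unfold Claim_equal_solution
  intro sales links _hdom hpre
  unfold Spec_solution
  obtain ⟨hne, hlinks, hacyc⟩ := hpre
  have hn1 : 0 < sales.length := List.length_pos_iff.mpr hne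
  have HR : ∀ x : Int, 1 ≤ x → x ≤ (sales.length : Int) →
      (x = 1 ∨ pvDesc (pvBuildG sales.length links) (sales.length + 1) 1 x = true) →
      ((∀ c ∈ pvChildren (pvBuildG sales.length links) x, 1 ≤ c ∧ c ≤ (sales.length : Int)) ∧
       pvDesc (pvBuildG sales.length links) (sales.length + 1) x x = false) := by
    intro x h1 h2 hr
    have hm : (x - 1).toNat ∈ List.range sales.length := by
      simp only [List.mem_range]; omega
    have h := hacyc _ hm
    have hxx : (((x - 1).toNat : Nat) : Int) + 1 = x := by omega
    rw [hxx] at h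
    exact h hr
  have hgoodn : pvGood (pvBuildG sales.length links) sales.length 1 :=
    pvGood_of_acyclic sales.length _ HR sales.length [] 1 (by omega)
      (by exact_mod_cast hn1) (Or.inl rfl) (by simp) (by simp) (by simp) (by simp) (by simp)
  have hgoodn1 : pvGood (pvBuildG sales.length links) (sales.length + 1) 1 :=
    pvGood_mono _ hgoodn (by omega)
  obtain ⟨_, hV, _⟩ := pvDfs_eq sales.length _ sales HR (sales.length + 1) (le_refl _) 1
    (by omega) (by exact_mod_cast hn1) 0 (by omega) (Or.inl rfl) hgoodn1
    (List.replicate (sales.length + 1) (0, 0)) (by simp)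
  have hB : PySem.List.pyGetD
      (pvIter (pvBuildG sales.length links) sales sales.length sales.length
        (List.replicate (sales.length + 1) ((0 : Int), (0 : Int)))) 1 (0, 0)
      = pvCost (pvBuildG sales.length links) sales sales.length 1 := by
    rw [pvIter_eq_pow]
    exact pvPow_get _ sales _ _ HR sales.length 1 (by omega) (by exact_mod_cast hn1) 0
      (by omega) (Or.inl rfl) hgoodn
  have hstab : pvCost (pvBuildG sales.length links) sales sales.length 1
      = pvCost (pvBuildG sales.length links) sales (sales.length + 1) 1 :=
    pvCost_stable _ sales hgoodn (by omega)
  simp only [solution, solution_alt]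
  rw [hV, hB, hstab]
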